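-- pv_equiv track=rewrite | github.com/anton-petrunin/Toponogov-5 | python/triples6.py | CongruentConfiguration
-- ===== SOURCE A (Python) =====
-- from itertools import permutations
--
-- Total={0,1,2,3,4,5}
--
-- def DubleSort(configuration):
--   for i in configuration:
--     [i[0],i[2]]=sorted([i[0],i[2]])
--   return sorted(configuration)
--
-- def CongruentConfiguration(a,b):
--   n=len(a)
--   bb=DubleSort(b)
--   if (n!=len(b)):
--     return False
--   else:
--     for q in list(permutations(range(len(Total)))):
--         if DubleSort([[q[i] for i in j] for j in a])==bb:
--           return True
--     return False
-- ===== SOURCE B (Python) =====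
-- # Pruned backtracking over label assignments instead of enumerating all 720
-- # relabelings: normalize b's triples once into a multiset of counts, then extend
-- # a partial injective label->vertex map row by row, consuming matched triples
-- # and backtracking at rows that introduce unmapped labels.
-- # NOTE: unlike A, B does not mutate b in place (A's DubleSort sorts each of
-- # b's rows' 0th/2nd entries in place); the equivalence is about the return value.
--
-- def _norm(row):
--     r = list(row)
--     if r[0] > r[2]:
--         r[0], r[2] = r[2], r[0]
--     return r
--
-- def _solve(rows, i, m, pool):
--     # pool maps a normalized row (as a tuple) to its remaining multiplicity.
--     while i < len(rows):
--         row = rows[i]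
--         new = [x for x in row if x not in m]
--         if new:
--             x = new[0]
--             for v in range(6):
--                 if v not in m.values():
--                     m2 = dict(m)
--                     m2[x] = v
--                     if _solve(rows, i, m2, dict(pool)):
--                         return True
--             return False
--         t = tuple(_norm([m[x] for x in row]))
--         if pool.get(t, 0) == 0:
--             return False
--         pool[t] = pool[t] - 1
--         i += 1
--     return True
--
-- def CongruentConfiguration(a, b):
--     if len(a) != len(b):
--         return False
--     for row in a:
--         for x in row:
--             if not (0 <= x < 6):
--                 raise ValueError("vertex label outside range(6): %r" % (x,))
--     pool = {}
--     for row in b: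
--         t = tuple(_norm(row))
--         pool[t] = pool.get(t, 0) + 1
--     return _solve(a, 0, {}, pool)
-- ===== Notes on version B (the rewrite author's own statement) =====
-- stated objective: alternative
-- what changed: Instead of enumerating all 720 vertex permutations and re-sorting the whole relabeled configuration for each, B normalizes b's triples once into a multiset of counts and runs a pruned backtracking search that extends a partial injective label-to-vertex map row by row, consuming matched triples and branching only at rows that introduce unmapped labels.
-- outside the precondition, e.g. on CongruentConfiguration([[-1, 0, 1]], [[5, 0, 1]]): A returns True, B raises ValueError; on CongruentConfiguration([[0, 1]], [[0, 1]]): A raises IndexError, B raises IndexError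
import Mathlib
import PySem

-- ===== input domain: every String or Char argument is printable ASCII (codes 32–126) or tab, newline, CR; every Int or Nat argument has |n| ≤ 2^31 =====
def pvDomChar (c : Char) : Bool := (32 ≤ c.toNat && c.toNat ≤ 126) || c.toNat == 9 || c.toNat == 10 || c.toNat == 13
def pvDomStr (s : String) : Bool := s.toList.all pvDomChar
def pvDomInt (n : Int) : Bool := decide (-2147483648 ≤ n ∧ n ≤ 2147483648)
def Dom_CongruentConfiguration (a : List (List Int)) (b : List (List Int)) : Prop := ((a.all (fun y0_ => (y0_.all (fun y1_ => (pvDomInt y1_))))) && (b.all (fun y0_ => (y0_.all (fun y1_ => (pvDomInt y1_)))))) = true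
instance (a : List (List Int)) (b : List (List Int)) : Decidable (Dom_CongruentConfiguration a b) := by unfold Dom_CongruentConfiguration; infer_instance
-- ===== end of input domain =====

-- B replaces A's exhaustive enumeration of all 720 relabelings by a pruned backtracking
-- search over injective label assignments against a multiset of b's normalized triples
-- (objective: alternative).  A mutates b in place (DubleSort sorts b's rows' entries 0/2);
-- B does not: the equivalence proved here is about the return value only.

-- ===== PORT A =====
-- DubleSort: each row gets positions 0 and 2 sorted in place, then the rows are sorted.
def pvDubleSortRow (r : List Int) : List Int :=
  let x := PySem.List.pyGetD r 0 0
  let z := PySem.List.pyGetD r 2 0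
  PySem.List.pySetD (PySem.List.pySetD r 0 (min x z)) 2 (max x z)

def pvDubleSort (c : List (List Int)) : List (List Int) :=
  @PySem.List.sorted (List Int) (List Int) List.instLinearOrder.toLT
    LinearOrder.toDecidableLT (c.map pvDubleSortRow) (fun r => r) false

def CongruentConfiguration (a : List (List Int)) (b : List (List Int)) : Bool :=
  let n := a.length
  let bb := pvDubleSort b
  if n ≠ b.length then false
  else
    (PySem.List.permutations (PySem.List.pyRange 0 6 1) 6).any (fun q =>
      pvDubleSort (a.map (fun j => j.map (fun i => PySem.List.pyGetD q i 0))) == bb)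

-- ===== PORT B =====
-- _norm: swap entries 0 and 2 if out of order (copy; the original row is untouched).
def pvNormRow (r : List Int) : List Int :=
  let x := PySem.List.pyGetD r 0 0
  let z := PySem.List.pyGetD r 2 0
  if x > z then PySem.List.pySetD (PySem.List.pySetD r 0 z) 2 x else r

-- the free target values for the next assignment (range(6) minus m's values)
def pvFreeVals (m : PySem.Dict Int Int) : List Int :=
  (PySem.List.pyRange 0 6 1).filter (fun w => !(m.values.contains w))

-- two termination facts the port's recursion cites: a fresh insert appends its value,
-- so assigning a free value strictly shrinks the free-value list
theorem pvValues_insert_fresh (m : PySem.Dict Int Int) (x v : Int) (hx : m.contains x = false) :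
    (m.insert x v).values = m.values ++ [v] := by
  have h := PySem.Dict.items_insert_of_not_contains m v hx
  simp only [PySem.Dict.values, h, List.map_append, List.map_cons, List.map_nil]

theorem pvFreeVals_insert_lt (m : PySem.Dict Int Int) (x v : Int)
    (hx : m.contains x = false) (hv : v ∈ pvFreeVals m) :
    (pvFreeVals (m.insert x v)).length < (pvFreeVals m).length := by
  have hrw : pvFreeVals (m.insert x v)
      = (pvFreeVals m).filter (fun w => !(w == v)) := by
    simp only [pvFreeVals]
    rw [List.filter_filter]
    apply List.filter_congr
    intro w _
    by_cases hwv : w = v <;> by_cases hwm : w ∈ m.values <;>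
      simp [pvValues_insert_fresh m x v hx, hwv, hwm]
  rw [hrw]
  apply List.length_filter_lt_length_iff_exists.mpr
  exact ⟨v, hv, by simp⟩

-- _solve: the while loop over rows is the structural recursion on `rows`;
-- the backtracking branch recurses with the same rows and an extended map.
def pvSolve (rows : List (List Int)) (m : PySem.Dict Int Int)
    (pool : PySem.Dict (List Int) Int) : Bool :=
  match rows with
  | [] => true
  | row :: rest =>
    match hnew : row.filter (fun x => !(m.contains x)) with
    | x :: _ =>
      -- for v in range(6): if v not in m.values(): ... (attach only carries the membership proof)
      (pvFreeVals m).attach.any (fun v =>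
        pvSolve (row :: rest) (m.insert x v.1) pool)
    | [] =>
      if pool.getD (pvNormRow (row.map (fun y => m.getD y 0))) 0 == 0 then false
      else pvSolve rest m (pool.insert (pvNormRow (row.map (fun y => m.getD y 0)))
        (pool.getD (pvNormRow (row.map (fun y => m.getD y 0))) 0 - 1))
termination_by ((pvFreeVals m).length, rows.length)
decreasing_by
  · exact Prod.Lex.left _ _ (pvFreeVals_insert_lt m x v.1
      (by
        have hxmem : x ∈ row.filter (fun x => !(m.contains x)) := by
          rw [hnew]; exact List.mem_cons_self ..
        have := (List.mem_filter.mp hxmem).2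
        simpa using this)
      v.2)
  · exact Prod.Lex.right _ (by simp)

-- CongruentConfiguration (B): length check, label validation (raises outside Pre_),
-- then the backtracking search against the counter of b's normalized rows.
def CongruentConfiguration_alt (a : List (List Int)) (b : List (List Int)) : Bool :=
  if a.length ≠ b.length then false
  else
    -- the ValueError label validation of Source B raises exactly outside Pre_; no value to port
    let pool := b.foldl (fun d row =>
      let t := pvNormRow row
      d.insert t (d.getD t 0 + 1)) (PySem.Dict.mk [])
    pvSolve a (PySem.Dict.mk []) pool

-- ===== PRECONDITION & SPEC =====
-- Pre_ excludes inputs where some row of b (or, when the lengths agree, of a) has fewer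
-- than 3 entries — there A raises IndexError — and inputs where the lengths agree and a
-- label of a lies outside range(6): for labels ≥ 6 or < -6 A raises IndexError, for
-- labels in [-6,-1] A silently relabels them through Python's negative-index wraparound
-- while B validates its labels and raises ValueError.
def Pre_CongruentConfiguration (a : List (List Int)) (b : List (List Int)) : Prop :=
  (∀ r ∈ b, 3 ≤ r.length) ∧
  (a.length = b.length →
    (∀ r ∈ a, 3 ≤ r.length) ∧ (∀ r ∈ a, ∀ x ∈ r, 0 ≤ x ∧ x < 6))
instance (a : List (List Int)) (b : List (List Int)) : Decidable (Pre_CongruentConfiguration a b) := by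
  unfold Pre_CongruentConfiguration; infer_instance

def pvWitness_CongruentConfiguration : List (List Int) × List (List Int) :=
  ([[0, 1, 2]], [[2, 1, 0]])

def Spec_CongruentConfiguration (a : List (List Int)) (b : List (List Int)) (out : Bool) : Prop := out = CongruentConfiguration_alt a b
instance (a : List (List Int)) (b : List (List Int)) (out : Bool) : Decidable (Spec_CongruentConfiguration a b out) := by unfold Spec_CongruentConfiguration; infer_instance

-- ===== CLAIM (what is proved, stated in full; the proofs are below) =====
def Claim_equal_CongruentConfiguration : Prop := ∀ (a : List (List Int)) (b : List (List Int)), Dom_CongruentConfiguration a b → Pre_CongruentConfiguration a b → Spec_CongruentConfiguration a b (CongruentConfiguration a b)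


-- ===== LEMMAS AND PROOFS =====

def pvSolveL (rows : List (List Int)) (m : PySem.Dict Int Int)
    (pool : List (List Int)) : Bool :=
  match rows with
  | [] => true
  | row :: rest =>
    match hnew : row.filter (fun x => !(m.contains x)) with
    | x :: _ =>
      (pvFreeVals m).attach.any (fun v =>
        pvSolveL (row :: rest) (m.insert x v.1) pool)
    | [] =>
      match PySem.List.remove? pool (pvNormRow (row.map (fun y => m.getD y 0))) with
      | some p => pvSolveL rest m p
      | none => false
termination_by ((pvFreeVals m).length, rows.length)
decreasing_by
  · exact Prod.Lex.left _ _ (pvFreeVals_insert_lt m x v.1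
      (by
        have hxmem : x ∈ row.filter (fun x => !(m.contains x)) := by
          rw [hnew]; exact List.mem_cons_self ..
        have := (List.mem_filter.mp hxmem).2
        simpa using this)
      v.2)
  · exact Prod.Lex.right _ (by simp)
theorem pvSolveL_cons_branch (row : List Int) (rest : List (List Int)) (m : PySem.Dict Int Int)
    (pool : List (List Int)) (x : Int) (tl : List Int)
    (h : row.filter (fun x => !(m.contains x)) = x :: tl) :
    pvSolveL (row :: rest) m pool =
      (pvFreeVals m).attach.any (fun v => pvSolveL (row :: rest) (m.insert x v.1) pool) := by
  rw [pvSolveL, h]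

theorem pvSolveL_cons_det (row : List Int) (rest : List (List Int)) (m : PySem.Dict Int Int)
    (pool : List (List Int))
    (h : row.filter (fun x => !(m.contains x)) = []) :
    pvSolveL (row :: rest) m pool =
      (match PySem.List.remove? pool (pvNormRow (row.map (fun y => m.getD y 0))) with
       | some p => pvSolveL rest m p
       | none => false) := by
  rw [pvSolveL, h]

theorem pvSolve_cons_branch (row : List Int) (rest : List (List Int)) (m : PySem.Dict Int Int)
    (pool : PySem.Dict (List Int) Int) (x : Int) (tl : List Int)
    (h : row.filter (fun x => !(m.contains x)) = x :: tl) :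
    pvSolve (row :: rest) m pool =
      (pvFreeVals m).attach.any (fun v => pvSolve (row :: rest) (m.insert x v.1) pool) := by
  rw [pvSolve, h]

theorem pvSolve_cons_det (row : List Int) (rest : List (List Int)) (m : PySem.Dict Int Int)
    (pool : PySem.Dict (List Int) Int)
    (h : row.filter (fun x => !(m.contains x)) = []) :
    pvSolve (row :: rest) m pool =
      (if pool.getD (pvNormRow (row.map (fun y => m.getD y 0))) 0 == 0 then false
       else pvSolve rest m (pool.insert (pvNormRow (row.map (fun y => m.getD y 0)))
              (pool.getD (pvNormRow (row.map (fun y => m.getD y 0))) 0 - 1))) := by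
  rw [pvSolve, h]

theorem pvMap_attach_getD (m : PySem.Dict Int Int) (row : List Int) :
    List.map (fun x => match x with | ⟨y, _⟩ => m.getD y 0) row.attach
      = row.map (fun y => m.getD y 0) := by
  simp

theorem pvSolve_eq_solveL : ∀ (rows : List (List Int)) (m : PySem.Dict Int Int)
    (L : List (List Int)) (pool : PySem.Dict (List Int) Int),
    (∀ t, pool.getD t 0 = (L.count t : Int)) →
    pvSolve rows m pool = pvSolveL rows m L := by
  intro rows m L
  induction rows, m, L using pvSolveL.induct with
  | case1 m L =>
    intro pool hc
    rw [pvSolve, pvSolveL]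
  | case2 m L row rest x tl h ih =>
    intro pool hc
    rw [pvSolve_cons_branch row rest m pool x tl h, pvSolveL_cons_branch row rest m L x tl h]
    exact List.any_congr rfl (fun v => ih v pool hc)
  | case3 m L row rest h p hp ih =>
    intro pool hc
    rw [pvSolve_cons_det row rest m pool h, pvSolveL_cons_det row rest m L h]
    rw [pvMap_attach_getD] at hp
    rw [hp]
    have hmem : pvNormRow (row.map (fun y => m.getD y 0)) ∈ L := by
      by_contra hno
      rw [(PySem.List.remove?_eq_none_iff _ _).mpr hno] at hp
      exact absurd hp (by simp)
    have hcount : 1 ≤ L.count (pvNormRow (row.map (fun y => m.getD y 0))) :=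
      List.one_le_count_iff.mpr hmem
    have hne : ¬ (pool.getD (pvNormRow (row.map (fun y => m.getD y 0))) 0 == 0) = true := by
      rw [hc]
      simp
      omega
    simp only [hne, Bool.if_false_left]
    have hp : p = L.erase (pvNormRow (row.map (fun y => m.getD y 0))) := by
      have := PySem.List.remove?_eq_some_erase L _ hmem
      rw [this] at hp
      exact (Option.some_inj.mp hp).symm
    apply ih
    intro t'
    by_cases he : t' = pvNormRow (row.map (fun y => m.getD y 0))
    · subst he
      rw [PySem.Dict.getD_insert_self, hc, hp, List.count_erase_self]
      push_cast
      omega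
    · rw [PySem.Dict.getD_insert_of_ne _ _ _ he, hc, hp, List.count_erase_of_ne he]
  | case4 m L row rest h hp =>
    intro pool hc
    rw [pvSolve_cons_det row rest m pool h, pvSolveL_cons_det row rest m L h]
    rw [pvMap_attach_getD] at hp
    rw [hp]
    have hno : pvNormRow (row.map (fun y => m.getD y 0)) ∉ L :=
      (PySem.List.remove?_eq_none_iff _ _).mp hp
    have hz : (pool.getD (pvNormRow (row.map (fun y => m.getD y 0))) 0 == 0) = true := by
      rw [hc, List.count_eq_zero_of_not_mem hno]
      simp
    simp [hz]

theorem pvMem_values_of_get? (items : List (Int × Int)) (k v : Int)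
    (h : (PySem.Dict.mk items).get? k = some v) : v ∈ (PySem.Dict.mk items).values := by
  induction items with
  | nil => simp [PySem.Dict.get?] at h
  | cons p rest ih =>
    obtain ⟨k0, v0⟩ := p
    rw [PySem.Dict.get?_mk_cons] at h
    by_cases hk : (k0 == k) = true
    · simp [hk] at h
      simp [PySem.Dict.values, h]
    · simp [hk] at h
      have := ih h
      simp [PySem.Dict.values] at this ⊢
      exact Or.inr this

theorem pvGet?_inj_of_values_nodup (items : List (Int × Int)) (x y w : Int)
    (hnd : (PySem.Dict.mk items).values.Nodup)
    (hx : (PySem.Dict.mk items).get? x = some w) (hy : (PySem.Dict.mk items).get? y = some w) :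
    x = y := by
  induction items with
  | nil => simp [PySem.Dict.get?] at hx
  | cons p rest ih =>
    obtain ⟨k0, v0⟩ := p
    simp only [PySem.Dict.values, List.map_cons, List.nodup_cons] at hnd
    rw [PySem.Dict.get?_mk_cons] at hx hy
    by_cases hkx : (k0 == x) = true <;> by_cases hky : (k0 == y) = true
    · exact (beq_iff_eq.mp hkx).symm.trans (beq_iff_eq.mp hky)
    · simp [hkx] at hx
      simp [hky] at hy
      exact absurd (hx ▸ pvMem_values_of_get? rest y w hy) (by simpa [PySem.Dict.values] using hnd.1)
    · simp [hkx] at hx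
      simp [hky] at hy
      exact absurd (hy ▸ pvMem_values_of_get? rest x w hx) (by simpa [PySem.Dict.values] using hnd.1)
    · simp [hkx] at hx
      simp [hky] at hy
      exact ih hnd.2 hx hy

theorem pvExists_get?_of_mem_values (items : List (Int × Int)) (v : Int)
    (hnd : (PySem.Dict.mk items).keys.Nodup)
    (hv : v ∈ (PySem.Dict.mk items).values) :
    ∃ k, (PySem.Dict.mk items).get? k = some v := by
  induction items with
  | nil => simp [PySem.Dict.values] at hv
  | cons p rest ih =>
    obtain ⟨k0, v0⟩ := p
    simp only [PySem.Dict.keys, List.map_cons, List.nodup_cons] at hnd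
    simp only [PySem.Dict.values, List.map_cons, List.mem_cons] at hv
    rcases hv with hv | hv
    · exact ⟨k0, by rw [PySem.Dict.get?_mk_cons]; simp [hv]⟩
    · obtain ⟨k, hk⟩ := ih hnd.2 (by simpa [PySem.Dict.values] using hv)
      refine ⟨k, ?_⟩
      rw [PySem.Dict.get?_mk_cons]
      have hkeys : k ∈ (PySem.Dict.mk rest).keys := by
        by_contra hmem
        rw [(PySem.Dict.get?_eq_none_iff_not_mem_keys _ _).mpr hmem] at hk
        exact absurd hk (by simp)
      have hne : ¬ (k0 == k) = true := by
        intro he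
        apply hnd.1
        have h2 := hkeys
        simp only [PySem.Dict.keys] at h2
        exact (beq_iff_eq.mp he) ▸ h2
      simp [hne, hk]

-- ---- abstractions for the search proof ----
def pvLab (rows : List (List Int)) : List Int := rows.flatMap (fun r => r)

def pvF (g : Int → Int) (r : List Int) : List Int := pvNormRow (r.map g)

def pvGood (m : PySem.Dict Int Int) (rows : List (List Int)) (g : Int → Int) : Prop :=
  (∀ k v, m.get? k = some v → g k = v) ∧
  (∀ x, (m.contains x = true ∨ x ∈ pvLab rows) → 0 ≤ g x ∧ g x < 6) ∧
  (∀ x y, (m.contains x = true ∨ x ∈ pvLab rows) →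
    (m.contains y = true ∨ y ∈ pvLab rows) → g x = g y → x = y)

def pvMInv (m : PySem.Dict Int Int) : Prop :=
  m.keys.Nodup ∧ m.values.Nodup ∧ ∀ v ∈ m.values, 0 ≤ v ∧ v < 6


theorem pvMInv_empty : pvMInv (PySem.Dict.mk []) := by
  refine ⟨?_, ?_, ?_⟩ <;> simp [PySem.Dict.keys, PySem.Dict.values]

theorem pvMInv_insert (m : PySem.Dict Int Int) (x v : Int) (hm : pvMInv m)
    (hx : m.contains x = false) (hv : v ∈ pvFreeVals m) : pvMInv (m.insert x v) := by
  obtain ⟨hk, hvnd, hvb⟩ := hm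
  have hval := pvValues_insert_fresh m x v hx
  have hvmem : v ∉ m.values ∧ 0 ≤ v ∧ v < 6 := by
    have h1 := List.mem_filter.mp hv
    have h2 := PySem.List.mem_pyRange_one.mp h1.1
    refine ⟨by simpa using h1.2, by omega, by omega⟩
  refine ⟨PySem.Dict.nodup_keys_insert _ _ _ hk, ?_, ?_⟩
  · rw [hval]
    simp [List.nodup_append, hvnd]
    exact fun a ha hav => hvmem.1 (hav ▸ ha)
  · rw [hval]
    intro w hw
    rcases List.mem_append.mp hw with h | h
    · exact hvb w h
    · simp at h
      subst h
      exact hvmem.2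

-- `g k := m.getD k 0` is pvGood for no rows
theorem pvContains_exists_get? (m : PySem.Dict Int Int) (x : Int) (h : m.contains x = true) :
    ∃ v, m.get? x = some v := by
  rw [PySem.Dict.contains_eq_isSome_get?] at h
  exact Option.isSome_iff_exists.mp h

theorem pvGood_base (m : PySem.Dict Int Int) (hm : pvMInv m) :
    pvGood m [] (fun k => m.getD k 0) := by
  obtain ⟨hk, hvnd, hvb⟩ := hm
  refine ⟨?_, ?_, ?_⟩
  · intro k v h
    show m.getD k 0 = v
    rw [PySem.Dict.getD_eq_get?_getD, h]
    rfl
  · intro x hx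
    rcases hx with hx | hx
    · obtain ⟨v, hv⟩ := pvContains_exists_get? m x hx
      show 0 ≤ m.getD x 0 ∧ m.getD x 0 < 6
      rw [PySem.Dict.getD_eq_get?_getD, hv]
      obtain ⟨items⟩ := m
      exact hvb v (pvMem_values_of_get? items x v hv)
    · simp [pvLab] at hx
  · intro x y hx hy hxy
    rcases hx with hx | hx
    · rcases hy with hy | hy
      · obtain ⟨vx, hvx⟩ := pvContains_exists_get? m x hx
        obtain ⟨vy, hvy⟩ := pvContains_exists_get? m y hy
        replace hxy : m.getD x 0 = m.getD y 0 := hxy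
        rw [PySem.Dict.getD_eq_get?_getD, hvx] at hxy
        rw [PySem.Dict.getD_eq_get?_getD, hvy] at hxy
        simp at hxy
        obtain ⟨items⟩ := m
        exact pvGet?_inj_of_values_nodup items x y vx hvnd hvx (by rw [hvy, hxy])
      · simp [pvLab] at hy
    · simp [pvLab] at hx


theorem pvLab_cons (row : List Int) (rest : List (List Int)) :
    pvLab (row :: rest) = row ++ pvLab rest := by
  simp [pvLab]

theorem pvGood_mono_rows (m : PySem.Dict Int Int) (row : List Int) (rest : List (List Int))
    (g : Int → Int) (h : pvGood m (row :: rest) g) : pvGood m rest g := by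
  obtain ⟨h1, h2, h3⟩ := h
  have hsub : ∀ x, x ∈ pvLab rest → x ∈ pvLab (row :: rest) := by
    intro x hx; rw [pvLab_cons]; exact List.mem_append_right _ hx
  exact ⟨h1, fun x hx => h2 x (hx.imp id (hsub x)),
    fun x y hx hy => h3 x y (hx.imp id (hsub x)) (hy.imp id (hsub y))⟩

theorem pvGood_cons_of_dom (m : PySem.Dict Int Int) (row : List Int) (rest : List (List Int))
    (g : Int → Int) (h : pvGood m rest g) (hdom : ∀ x ∈ row, m.contains x = true) :
    pvGood m (row :: rest) g := by
  obtain ⟨h1, h2, h3⟩ := h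
  have hsub : ∀ x, (m.contains x = true ∨ x ∈ pvLab (row :: rest)) →
      (m.contains x = true ∨ x ∈ pvLab rest) := by
    intro x hx
    rcases hx with hx | hx
    · exact Or.inl hx
    · rw [pvLab_cons] at hx
      rcases List.mem_append.mp hx with hx | hx
      · exact Or.inl (hdom x hx)
      · exact Or.inr hx
  exact ⟨h1, fun x hx => h2 x (hsub x hx), fun x y hx hy => h3 x y (hsub x hx) (hsub y hy)⟩

theorem pvMapRow_eq (m : PySem.Dict Int Int) (row : List Int) (g : Int → Int)
    (hdom : ∀ x ∈ row, m.contains x = true)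
    (h1 : ∀ k v, m.get? k = some v → g k = v) :
    row.map (fun y => m.getD y 0) = row.map g := by
  apply List.map_congr_left
  intro x hx
  obtain ⟨v, hv⟩ := pvContains_exists_get? m x (hdom x hx)
  rw [PySem.Dict.getD_eq_get?_getD, hv, h1 x v hv]
  rfl

theorem pvGood_insert_weaken (m : PySem.Dict Int Int) (x v : Int) (rows : List (List Int))
    (g : Int → Int) (hx : m.contains x = false)
    (h : pvGood (m.insert x v) rows g) : pvGood m rows g := by
  obtain ⟨h1, h2, h3⟩ := h
  have hup : ∀ k w, m.get? k = some w → (m.insert x v).get? k = some w := by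
    intro k w hk
    rw [PySem.Dict.get?_insert]
    by_cases he : k = x
    · subst he
      rw [(PySem.Dict.get?_eq_none_iff_contains m k).mpr hx] at hk
      exact absurd hk (by simp)
    · simp [he, hk]
  have hcs : ∀ y, (m.contains y = true ∨ y ∈ pvLab rows) →
      ((m.insert x v).contains y = true ∨ y ∈ pvLab rows) := by
    intro y hy
    rcases hy with hy | hy
    · rw [PySem.Dict.contains_insert]
      exact Or.inl (by simp [hy])
    · exact Or.inr hy
  exact ⟨fun k w hk => h1 k w (hup k w hk), fun y hy => h2 y (hcs y hy),
    fun y z hy hz => h3 y z (hcs y hy) (hcs z hz)⟩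

theorem pvGood_insert_self (m : PySem.Dict Int Int) (x : Int) (rows : List (List Int))
    (g : Int → Int) (hx : m.contains x = false) (hxl : x ∈ pvLab rows)
    (h : pvGood m rows g) : pvGood (m.insert x (g x)) rows g := by
  obtain ⟨h1, h2, h3⟩ := h
  have hcs : ∀ y, ((m.insert x (g x)).contains y = true ∨ y ∈ pvLab rows) →
      (m.contains y = true ∨ y ∈ pvLab rows) := by
    intro y hy
    rcases hy with hy | hy
    · rw [PySem.Dict.contains_insert] at hy
      rcases Bool.or_eq_true_iff.mp hy with hy | hy
      · exact Or.inr ((beq_iff_eq.mp hy) ▸ hxl)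
      · exact Or.inl hy
    · exact Or.inr hy
  refine ⟨?_, fun y hy => h2 y (hcs y hy), fun y z hy hz => h3 y z (hcs y hy) (hcs z hz)⟩
  intro k w hk
  rw [PySem.Dict.get?_insert] at hk
  by_cases he : k = x
  · simp [he] at hk
    rw [he, hk]
  · simp [he] at hk
    exact h1 k w hk

theorem pvFreeVals_mem_of_good (m : PySem.Dict Int Int) (x : Int) (rows : List (List Int))
    (g : Int → Int) (hm : pvMInv m) (hx : m.contains x = false) (hxl : x ∈ pvLab rows)
    (h : pvGood m rows g) : g x ∈ pvFreeVals m := by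
  obtain ⟨h1, h2, h3⟩ := h
  have hb := h2 x (Or.inr hxl)
  apply List.mem_filter.mpr
  refine ⟨PySem.List.mem_pyRange_one.mpr ⟨hb.1, hb.2⟩, ?_⟩
  simp only [Bool.not_eq_eq_eq_not, Bool.not_true, List.contains_eq_mem, decide_eq_false_iff_not]
  intro hmem
  obtain ⟨items⟩ := m
  obtain ⟨k, hk⟩ := pvExists_get?_of_mem_values items (g x) hm.1 hmem
  have hgk := h1 k (g x) hk
  have hkc : (PySem.Dict.mk items).contains k = true := by
    rw [PySem.Dict.contains_eq_isSome_get?, hk]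
    rfl
  have := h3 k x (Or.inl hkc) (Or.inr hxl) hgk
  subst this
  rw [hkc] at hx
  exact Bool.noConfusion hx

theorem pvSolveL_spec : ∀ (rows : List (List Int)) (m : PySem.Dict Int Int)
    (pool : List (List Int)), pvMInv m → pool.length = rows.length →
    (pvSolveL rows m pool = true ↔
      ∃ g, pvGood m rows g ∧ (rows.map (pvF g)).Perm pool) := by
  intro rows m pool
  induction rows, m, pool using pvSolveL.induct with
  | case1 m pool =>
    intro hm hlen
    have hpool : pool = [] := List.eq_nil_of_length_eq_zero (by simpa using hlen)
    subst hpool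
    constructor
    · intro _
      exact ⟨fun k => m.getD k 0, pvGood_base m hm, by simp⟩
    · intro _
      rw [pvSolveL]
  | case2 m pool row rest x tl h ih =>
    intro hm hlen
    have hxrow : x ∈ row ∧ m.contains x = false := by
      have hxmem : x ∈ row.filter (fun x => !(m.contains x)) := by
        rw [h]; exact List.mem_cons_self ..
      have := List.mem_filter.mp hxmem
      exact ⟨this.1, by simpa using this.2⟩
    have hxlab : x ∈ pvLab (row :: rest) := by
      rw [pvLab_cons]; exact List.mem_append_left _ hxrow.1
    rw [pvSolveL_cons_branch row rest m pool x tl h]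
    rw [List.any_eq_true]
    constructor
    · rintro ⟨v, _, hv⟩
      have hinv := pvMInv_insert m x v.1 hm hxrow.2 v.2
      obtain ⟨g, hg, hperm⟩ := (ih v hinv hlen).mp hv
      exact ⟨g, pvGood_insert_weaken m x v.1 _ g hxrow.2 hg, hperm⟩
    · rintro ⟨g, hg, hperm⟩
      have hvmem : g x ∈ pvFreeVals m := pvFreeVals_mem_of_good m x _ g hm hxrow.2 hxlab hg
      refine ⟨⟨g x, hvmem⟩, List.mem_attach _ _, ?_⟩
      have hinv := pvMInv_insert m x (g x) hm hxrow.2 hvmem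
      exact (ih ⟨g x, hvmem⟩ hinv hlen).mpr
        ⟨g, pvGood_insert_self m x _ g hxrow.2 hxlab hg, hperm⟩
  | case3 m pool row rest h p hp ih =>
    intro hm hlen
    rw [pvMap_attach_getD] at hp
    have hdom : ∀ y ∈ row, m.contains y = true := by
      intro y hy
      have := List.filter_eq_nil_iff.mp h y hy
      simpa using this
    rw [pvSolveL_cons_det row rest m pool h, hp]
    have hT : pvNormRow (row.map (fun y => m.getD y 0)) ∈ pool := by
      by_contra hno
      rw [(PySem.List.remove?_eq_none_iff _ _).mpr hno] at hp
      exact absurd hp (by simp)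
    have hpe : p = pool.erase (pvNormRow (row.map (fun y => m.getD y 0))) := by
      have := PySem.List.remove?_eq_some_erase pool _ hT
      rw [this] at hp
      exact (Option.some_inj.mp hp).symm
    have hplen : p.length = rest.length := by
      rw [hpe, List.length_erase_of_mem hT]
      simp at hlen
      omega
    rw [ih hm hplen]
    constructor
    · rintro ⟨g, hg, hperm⟩
      refine ⟨g, pvGood_cons_of_dom m row rest g hg hdom, ?_⟩
      have hrowT : pvF g row = pvNormRow (row.map (fun y => m.getD y 0)) := by
        unfold pvF
        rw [pvMapRow_eq m row g hdom hg.1]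
      rw [List.map_cons, hrowT]
      refine List.Perm.trans (hperm.cons _) ?_
      rw [hpe]
      exact (List.perm_cons_erase hT).symm
    · rintro ⟨g, hg, hperm⟩
      have hrowT : pvF g row = pvNormRow (row.map (fun y => m.getD y 0)) := by
        unfold pvF
        rw [pvMapRow_eq m row g hdom hg.1]
      refine ⟨g, pvGood_mono_rows m row rest g hg, ?_⟩
      rw [hpe]
      have := hperm.erase (pvNormRow (row.map (fun y => m.getD y 0)))
      rw [List.map_cons, hrowT, List.erase_cons_head] at this
      exact this
  | case4 m pool row rest h hp =>
    intro hm hlen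
    rw [pvMap_attach_getD] at hp
    have hdom : ∀ y ∈ row, m.contains y = true := by
      intro y hy
      have := List.filter_eq_nil_iff.mp h y hy
      simpa using this
    rw [pvSolveL_cons_det row rest m pool h, hp]
    simp only [Bool.false_eq_true, false_iff]
    rintro ⟨g, hg, hperm⟩
    have hrowT : pvF g row = pvNormRow (row.map (fun y => m.getD y 0)) := by
      unfold pvF
      rw [pvMapRow_eq m row g hdom hg.1]
    have hT : pvNormRow (row.map (fun y => m.getD y 0)) ∈ pool := by
      apply hperm.subset
      rw [List.map_cons, hrowT]
      exact List.mem_cons_self ..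
    exact absurd hT ((PySem.List.remove?_eq_none_iff _ _).mp hp)

theorem pvFresh_exists (S : List Int) (g : Int → Int) (t : Int)
    (hS : ∀ x ∈ S, 0 ≤ x ∧ x < 6) (hgb : ∀ x ∈ S, 0 ≤ g x ∧ g x < 6)
    (hinj : ∀ x ∈ S, ∀ y ∈ S, g x = g y → x = y)
    (ht : 0 ≤ t ∧ t < 6) (htS : t ∉ S) :
    ∃ v : Int, 0 ≤ v ∧ v < 6 ∧ ∀ x ∈ S, g x ≠ v := by
  by_contra hno
  push Not at hno
  -- every value of Icc 0 5 is attained by g on S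
  have hsub : Finset.Icc (0 : Int) 5 ⊆ S.toFinset.image g := by
    intro v hv
    rw [Finset.mem_Icc] at hv
    obtain ⟨x, hx, hgx⟩ := hno v (by omega) (by omega)
    exact Finset.mem_image.mpr ⟨x, List.mem_toFinset.mpr hx, hgx⟩
  have hScard : S.toFinset ⊆ Finset.Icc (0 : Int) 5 \ {t} := by
    intro x hx
    have := hS x (List.mem_toFinset.mp hx)
    rw [Finset.mem_sdiff, Finset.mem_Icc]
    refine ⟨by omega, ?_⟩
    simp only [Finset.mem_singleton]
    intro he
    exact htS (he ▸ List.mem_toFinset.mp hx)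
  have h1 : (6 : Nat) ≤ (S.toFinset.image g).card := by
    have := Finset.card_le_card hsub
    simpa using this
  have h2 : (S.toFinset.image g).card ≤ S.toFinset.card := Finset.card_image_le
  have h3 : S.toFinset.card ≤ (Finset.Icc (0 : Int) 5 \ {t}).card := Finset.card_le_card hScard
  have h4 : (Finset.Icc (0 : Int) 5 \ {t}).card ≤ 5 := by
    have hmem : t ∈ Finset.Icc (0 : Int) 5 := Finset.mem_Icc.mpr (by omega)
    rw [Finset.card_sdiff, Finset.singleton_inter_of_mem hmem]
    simp
  omega

theorem pvExtendInj : ∀ (todo : List Int) (S : List Int) (g : Int → Int),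
    (∀ x ∈ S, 0 ≤ x ∧ x < 6) →
    (∀ x ∈ S, 0 ≤ g x ∧ g x < 6) →
    (∀ x ∈ S, ∀ y ∈ S, g x = g y → x = y) →
    (∀ x : Int, 0 ≤ x → x < 6 → x ∈ S ∨ x ∈ todo) →
    ∃ h : Int → Int, (∀ x ∈ S, h x = g x) ∧
      (∀ x : Int, 0 ≤ x → x < 6 → 0 ≤ h x ∧ h x < 6) ∧
      (∀ x y : Int, 0 ≤ x → x < 6 → 0 ≤ y → y < 6 → h x = h y → x = y) := by
  intro todo
  induction todo with
  | nil =>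
    intro S g hS hgb hinj hcov
    refine ⟨g, fun x _ => rfl, ?_, ?_⟩
    · intro x h0 h6
      rcases hcov x h0 h6 with hx | hx
      · exact hgb x hx
      · simp at hx
    · intro x y hx0 hx6 hy0 hy6 hxy
      rcases hcov x hx0 hx6 with hx | hx
      · rcases hcov y hy0 hy6 with hy | hy
        · exact hinj x hx y hy hxy
        · simp at hy
      · simp at hx
  | cons t ts ih =>
    intro S g hS hgb hinj hcov
    by_cases htr : (0 ≤ t ∧ t < 6) ∧ t ∉ S
    · obtain ⟨v, hv0, hv6, hvfresh⟩ := pvFresh_exists S g t hS hgb hinj htr.1 htr.2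
      obtain ⟨h, hagree, hb, hi⟩ := ih (t :: S) (Function.update g t v)
        (by
          intro x hx
          rcases List.mem_cons.mp hx with hx | hx
          · exact hx ▸ htr.1
          · exact hS x hx)
        (by
          intro x hx
          rcases List.mem_cons.mp hx with hx | hx
          · subst hx
            simp [Function.update_self]
            omega
          · rw [Function.update_of_ne (fun he => htr.2 (by rw [← he]; exact hx))]
            exact hgb x hx)
        (by
          intro x hx y hy hxy
          rcases List.mem_cons.mp hx with hx | hx
          · rcases List.mem_cons.mp hy with hy | hy
            · rw [hx, hy]
            · rw [hx, Function.update_self] at hxy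
              rw [Function.update_of_ne (fun he => htr.2 (by rw [← he]; exact hy))] at hxy
              exact absurd hxy.symm (hvfresh y hy)
          · rcases List.mem_cons.mp hy with hy | hy
            · rw [hy, Function.update_self] at hxy
              rw [Function.update_of_ne (fun he => htr.2 (by rw [← he]; exact hx))] at hxy
              exact absurd hxy (hvfresh x hx)
            · rw [Function.update_of_ne (fun he => htr.2 (by rw [← he]; exact hx)),
                Function.update_of_ne (fun he => htr.2 (by rw [← he]; exact hy))] at hxy
              exact hinj x hx y hy hxy)
        (by
          intro x h0 h6
          rcases hcov x h0 h6 with hx | hx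
          · exact Or.inl (List.mem_cons_of_mem _ hx)
          · rcases List.mem_cons.mp hx with hx | hx
            · exact Or.inl (hx ▸ List.mem_cons_self ..)
            · exact Or.inr hx)
      refine ⟨h, ?_, hb, hi⟩
      intro x hx
      rw [hagree x (List.mem_cons_of_mem _ hx),
        Function.update_of_ne (fun he => htr.2 (by rw [← he]; exact hx))]
    · apply ih S g hS hgb hinj
      intro x h0 h6
      rcases hcov x h0 h6 with hx | hx
      · exact Or.inl hx
      · rcases List.mem_cons.mp hx with hx | hx
        · subst hx
          rcases not_and_or.mp htr with hc | hc
          · exact absurd ⟨h0, h6⟩ hc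
          · exact Or.inl (not_not.mp hc)
        · exact Or.inr hx

-- ---- permutations completeness (membership for itertools.permutations) ----
theorem pvPerms_succ {α : Type} (xs : List α) (r : Nat) : PySem.List.permutations xs (r+1) =
    (List.range xs.length).flatMap (fun i =>
      match xs[i]? with
      | none => []
      | some x => (PySem.List.permutations (xs.eraseIdx i) r).map (fun p => x :: p)) := by
  simp only [PySem.List.permutations]
  congr 1

theorem pvMem_permutations_of_perm {α : Type} :
    ∀ (p xs : List α), p.Perm xs → p ∈ PySem.List.permutations xs xs.length := by
  intro p
  induction p with
  | nil =>
    intro xs h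
    have : xs = [] := h.symm.eq_nil
    subst this
    simp [PySem.List.permutations_zero]
  | cons a p' ih =>
    intro xs h
    have hmem : a ∈ xs := h.mem_iff.mp (List.mem_cons_self ..)
    obtain ⟨i, hi, hget⟩ := List.mem_iff_getElem.mp hmem
    have hlen : xs.length = p'.length + 1 := by
      have := h.length_eq; simpa using this.symm
    rw [hlen, pvPerms_succ]
    apply List.mem_flatMap.mpr
    refine ⟨i, by simp [List.mem_range]; omega, ?_⟩
    have hgo : xs[i]? = some a := by
      rw [List.getElem?_eq_getElem hi, hget]
    rw [hgo]
    apply List.mem_map.mpr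
    refine ⟨p', ?_, rfl⟩
    have hperm : p'.Perm (xs.eraseIdx i) := by
      have h2 : xs.Perm (xs[i] :: xs.eraseIdx i) := (List.getElem_cons_eraseIdx_perm hi).symm
      rw [hget] at h2
      exact (h.trans h2).cons_inv
    have hl : (xs.eraseIdx i).length = p'.length := by
      rw [List.length_eraseIdx_of_lt hi]; omega
    have := ih (xs.eraseIdx i) hperm
    rwa [hl] at this


theorem pvRange6_eq : PySem.List.pyRange 0 6 1 = [0, 1, 2, 3, 4, 5] := by decide

theorem pvGood_empty_iff (a : List (List Int)) (g : Int → Int) :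
    pvGood (PySem.Dict.mk []) a g ↔
      ((∀ x ∈ pvLab a, 0 ≤ g x ∧ g x < 6) ∧
       (∀ x ∈ pvLab a, ∀ y ∈ pvLab a, g x = g y → x = y)) := by
  have hc : ∀ x : Int, (PySem.Dict.mk ([] : List (Int × Int))).contains x = false := by
    intro x
    rw [PySem.Dict.contains_mk]
    rfl
  have hg : ∀ k : Int, (PySem.Dict.mk ([] : List (Int × Int))).get? k = none := by
    intro k
    exact (PySem.Dict.get?_eq_none_iff_contains _ _).mpr (hc k)
  constructor
  · rintro ⟨h1, h2, h3⟩
    exact ⟨fun x hx => h2 x (Or.inr hx), fun x hx y hy => h3 x y (Or.inr hx) (Or.inr hy)⟩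
  · rintro ⟨h2, h3⟩
    refine ⟨?_, ?_, ?_⟩
    · intro k v hk
      rw [hg k] at hk
      exact absurd hk (by simp)
    · intro x hx
      rcases hx with hx | hx
      · rw [hc x] at hx
        exact absurd hx (by simp)
      · exact h2 x hx
    · intro x y hx hy
      rcases hx with hx | hx
      · rw [hc x] at hx
        exact absurd hx (by simp)
      rcases hy with hy | hy
      · rw [hc y] at hy
        exact absurd hy (by simp)
      exact h3 x hx y hy

theorem pvLit6_mem (w : Int) : w ∈ ([0, 1, 2, 3, 4, 5] : List Int) ↔ 0 ≤ w ∧ w < 6 := by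
  simp
  omega

theorem pvBridge (a : List (List Int)) (pool : List (List Int))
    (hlab : ∀ x ∈ pvLab a, 0 ≤ x ∧ x < 6) :
    ((∃ q ∈ PySem.List.permutations (PySem.List.pyRange 0 6 1) 6,
        (a.map (fun r => pvNormRow (r.map (fun i => PySem.List.pyGetD q i 0)))).Perm pool) ↔
      (∃ g, pvGood (PySem.Dict.mk []) a g ∧ (a.map (pvF g)).Perm pool)) := by
  constructor
  · rintro ⟨q, hq, hperm⟩
    have hq6 : q ∈ PySem.List.permutations (PySem.List.pyRange 0 6 1)
        (PySem.List.pyRange 0 6 1).length := by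
      have : (PySem.List.pyRange 0 6 1).length = 6 := by rw [pvRange6_eq]; rfl
      rwa [this]
    have hqp : q.Perm (PySem.List.pyRange 0 6 1) := PySem.List.perm_of_mem_permutations hq6
    have hlen6 : q.length = 6 := by
      rw [hqp.length_eq, pvRange6_eq]
      rfl
    have hnodup : q.Nodup := hqp.nodup_iff.mpr (by rw [pvRange6_eq]; decide)
    have hmemq : ∀ w ∈ q, 0 ≤ w ∧ w < 6 := by
      intro w hw
      have := hqp.mem_iff.mp hw
      rw [pvRange6_eq] at this
      exact (pvLit6_mem w).mp this
    refine ⟨fun i => PySem.List.pyGetD q i 0, (pvGood_empty_iff a _).mpr ⟨?_, ?_⟩, ?_⟩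
    · intro x hx
      obtain ⟨h0, h6⟩ := hlab x hx
      rw [PySem.List.pyGetD_eq_getElem q 0 h0 (by rw [hlen6]; omega)]
      exact hmemq _ (List.getElem_mem _)
    · intro x hx y hy hxy
      obtain ⟨hx0, hx6⟩ := hlab x hx
      obtain ⟨hy0, hy6⟩ := hlab y hy
      rw [PySem.List.pyGetD_eq_getElem q 0 hx0 (by rw [hlen6]; omega),
        PySem.List.pyGetD_eq_getElem q 0 hy0 (by rw [hlen6]; omega)] at hxy
      have := (List.Nodup.getElem_inj_iff hnodup).mp hxy
      omega
    · exact hperm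
  · rintro ⟨g, hgood, hperm⟩
    obtain ⟨hb, hi⟩ := (pvGood_empty_iff a g).mp hgood
    obtain ⟨h, hagree, hhb, hhi⟩ := pvExtendInj [0, 1, 2, 3, 4, 5] (pvLab a) g hlab hb hi
      (by
        intro x h0 h6
        exact Or.inr ((pvLit6_mem x).mpr ⟨h0, h6⟩))
    set q : List Int := [h 0, h 1, h 2, h 3, h 4, h 5] with hqdef
    have hqmap : q = ([0, 1, 2, 3, 4, 5] : List Int).map h := by rw [hqdef]; rfl
    have hqnodup : q.Nodup := by
      rw [hqmap]
      apply List.Nodup.map_on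
      · intro x hx y hy hxy
        have hx' := (pvLit6_mem x).mp hx
        have hy' := (pvLit6_mem y).mp hy
        exact hhi x y hx'.1 hx'.2 hy'.1 hy'.2 hxy
      · decide
    have hqsub : ∀ w ∈ q, 0 ≤ w ∧ w < 6 := by
      intro w hw
      rw [hqmap] at hw
      obtain ⟨i, hi6, rfl⟩ := List.mem_map.mp hw
      have := (pvLit6_mem i).mp hi6
      exact hhb i this.1 this.2
    have hqperm : q.Perm ([0, 1, 2, 3, 4, 5] : List Int) := by
      apply List.perm_of_nodup_nodup_toFinset_eq hqnodup (by decide)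
      apply Finset.eq_of_subset_of_card_le
      · intro w hw
        rw [List.mem_toFinset] at hw ⊢
        exact (pvLit6_mem w).mpr (hqsub w hw)
      · rw [List.toFinset_card_of_nodup hqnodup]
        have : q.length = 6 := by rw [hqmap]; rfl
        rw [this]
        decide
    have hqmem : q ∈ PySem.List.permutations (PySem.List.pyRange 0 6 1) 6 := by
      have h1 : q ∈ PySem.List.permutations (PySem.List.pyRange 0 6 1)
          (PySem.List.pyRange 0 6 1).length :=
        pvMem_permutations_of_perm q _ (by rw [pvRange6_eq]; exact hqperm)
      have h2 : (PySem.List.pyRange 0 6 1).length = 6 := by rw [pvRange6_eq]; rfl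
      rwa [h2] at h1
    refine ⟨q, hqmem, ?_⟩
    have hrows : a.map (fun r => pvNormRow (r.map (fun i => PySem.List.pyGetD q i 0)))
        = a.map (pvF g) := by
      apply List.map_congr_left
      intro r hr
      unfold pvF
      congr 1
      apply List.map_congr_left
      intro x hx
      have hxl : x ∈ pvLab a := by
        unfold pvLab
        exact List.mem_flatMap.mpr ⟨r, hr, hx⟩
      obtain ⟨h0, h6⟩ := hlab x hxl
      rw [← hagree x hxl, hqdef]
      interval_cases x <;> rfl
    rw [hrows]
    exact hperm

-- ---- A-side characterizations ----
theorem pvDubleSortRow_eq_normRow (r : List Int) (h : 3 ≤ r.length) :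
    pvDubleSortRow r = pvNormRow r := by
  match r, h with
  | x0 :: x1 :: x2 :: rs, _ =>
    unfold pvDubleSortRow pvNormRow
    have h0 : PySem.List.pyGetD (x0 :: x1 :: x2 :: rs) 0 0 = x0 := PySem.List.pyGetD_zero_cons ..
    have h2 : PySem.List.pyGetD (x0 :: x1 :: x2 :: rs) 2 0 = x2 := by
      rw [PySem.List.pyGetD_eq_getElem _ _ (by norm_num) (by simp; omega)]; rfl
    have hs0 : ∀ v : Int, PySem.List.pySetD (x0 :: x1 :: x2 :: rs) 0 v = v :: x1 :: x2 :: rs := by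
      intro v; rw [PySem.List.pySetD_of_nonneg _ _ (by norm_num)]; rfl
    have hs2 : ∀ w v : Int, PySem.List.pySetD (w :: x1 :: x2 :: rs) 2 v = w :: x1 :: v :: rs := by
      intro w v; rw [PySem.List.pySetD_of_nonneg _ _ (by norm_num)]; rfl
    simp only [h0, h2, hs0, hs2]
    by_cases hc : x2 < x0
    · simp [hc, min_eq_right (le_of_lt hc), max_eq_left (le_of_lt hc)]
    · have hc' : x0 ≤ x2 := not_lt.mp hc
      simp [hc, min_eq_left hc', max_eq_right hc']

theorem pvDubleSort_eq_iff (x y : List (List Int)) :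
    (pvDubleSort x = pvDubleSort y) ↔ (x.map pvDubleSortRow).Perm (y.map pvDubleSortRow) := by
  unfold pvDubleSort
  exact PySem.List.sorted_id_eq_sorted_id_iff_perm (κ := List Int) _ _


-- ===== VERDICT (by name: the statement is the Claim_ definition above) =====
theorem pvLab_bound (a : List (List Int)) (hlab : ∀ r ∈ a, ∀ x ∈ r, 0 ≤ x ∧ x < 6) :
    ∀ x ∈ pvLab a, 0 ≤ x ∧ x < 6 := by
  intro x hx
  obtain ⟨r, hr, hxr⟩ := List.mem_flatMap.mp hx
  exact hlab r hr x hxr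

theorem CongruentConfiguration_spec : Claim_equal_CongruentConfiguration := by
  intro a b _ hpre
  unfold Spec_CongruentConfiguration
  by_cases hlen : a.length = b.length
  case neg =>
    unfold CongruentConfiguration CongruentConfiguration_alt
    simp [hlen]
  case pos =>
    obtain ⟨hb3, hrest⟩ := hpre
    obtain ⟨ha3, hlab⟩ := hrest hlen
    -- B-side: reduce to the list-pool model
    have hpool1 : (b.foldl (fun d row =>
          d.insert (pvNormRow row) (d.getD (pvNormRow row) 0 + 1))
            (PySem.Dict.mk ([] : List (List Int × Int))))
        = ((b.map pvNormRow).foldl (fun d t => d.insert t (d.getD t 0 + 1))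
            (PySem.Dict.mk ([] : List (List Int × Int)))) :=
      (List.foldl_map (f := pvNormRow)
        (g := fun (d : PySem.Dict (List Int) Int) (t : List Int) =>
          d.insert t (d.getD t 0 + 1))).symm
    have hBpool : ∀ t, (b.foldl (fun d row =>
          d.insert (pvNormRow row) (d.getD (pvNormRow row) 0 + 1))
            (PySem.Dict.mk ([] : List (List Int × Int)))).getD t 0
        = (((b.map pvNormRow).count t : Nat) : Int) := by
      intro t
      rw [hpool1, PySem.Dict.getD_foldl_insert_add_one]
      have hz : (PySem.Dict.mk ([] : List ((List Int) × Int))).getD t 0 = 0 := rfl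
      rw [hz]
      ring
    have hB : CongruentConfiguration_alt a b = pvSolveL a (PySem.Dict.mk []) (b.map pvNormRow) := by
      unfold CongruentConfiguration_alt
      simp only [hlen, ne_eq, not_true_eq_false, if_false]
      exact pvSolve_eq_solveL a (PySem.Dict.mk []) (b.map pvNormRow) _ hBpool
    have hBspec := pvSolveL_spec a (PySem.Dict.mk []) (b.map pvNormRow) pvMInv_empty
      (by simp [hlen])
    -- A-side: existential over the permutation list
    have hA : (CongruentConfiguration a b = true) ↔
        ∃ q ∈ PySem.List.permutations (PySem.List.pyRange 0 6 1) 6,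
          pvDubleSort (a.map (fun j => j.map (fun i => PySem.List.pyGetD q i 0))) = pvDubleSort b := by
      unfold CongruentConfiguration
      simp [hlen, List.any_eq_true]
    have hbmap : b.map pvDubleSortRow = b.map pvNormRow :=
      List.map_congr_left (fun r hr => pvDubleSortRow_eq_normRow r (hb3 r hr))
    have hamap : ∀ q : List Int,
        (a.map (fun j => j.map (fun i => PySem.List.pyGetD q i 0))).map pvDubleSortRow
          = a.map (fun r => pvNormRow (r.map (fun i => PySem.List.pyGetD q i 0))) := by
      intro q
      rw [List.map_map]
      apply List.map_congr_left
      intro r hr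
      show pvDubleSortRow (r.map (fun i => PySem.List.pyGetD q i 0)) = _
      rw [pvDubleSortRow_eq_normRow _ (by rw [List.length_map]; exact ha3 r hr)]
    have hAiff : (CongruentConfiguration a b = true) ↔
        ∃ q ∈ PySem.List.permutations (PySem.List.pyRange 0 6 1) 6,
          (a.map (fun r => pvNormRow (r.map (fun i => PySem.List.pyGetD q i 0)))).Perm
            (b.map pvNormRow) := by
      rw [hA]
      apply exists_congr
      intro q
      apply and_congr_right
      intro _
      rw [pvDubleSort_eq_iff, hamap q, hbmap]
    -- chain
    have hiff : (CongruentConfiguration a b = true) ↔ (CongruentConfiguration_alt a b = true) := by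
      rw [hAiff, hB, hBspec]
      exact pvBridge a (b.map pvNormRow) (pvLab_bound a hlab)
    cases hAv : CongruentConfiguration a b <;> cases hBv : CongruentConfiguration_alt a b
    · rfl
    · rw [hAv, hBv] at hiff
      exact absurd (hiff.mpr rfl) (by simp)
    · rw [hAv, hBv] at hiff
      exact absurd (hiff.mp rfl) (by simp)
    · rfl
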